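-- pv_equiv track=rewrite | github.com/nohtaray/competitive-programming.py | list.py | cumsum3
-- ===== SOURCE A (Python) =====
-- import itertools
--
-- def cumsum3(arr):
--     """
--     3次元累積和
--     cum[rx][ry][rz] - cum[lx][ry][rz] - cum[rx][ly][rz] - cum[rx][ry][lz] + cum[lx][ly][rz] + cum[lx][ry][lz] + cum[rx][ly][lz] - cum[lx][ly][lz]
--     """
--     X = len(arr)
--     Y = len(arr[0])
--     Z = len(arr[0][0])
--     ret = [[[0] * (X + 1) for _ in range(Y + 1)] for _ in range(Z + 1)]
--     for x, y, z in itertools.product(range(X), range(Y), range(Z)):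
--         ret[x + 1][y + 1][z + 1] = (
--             ret[x][y + 1][z + 1]
--             + ret[x + 1][y][z + 1]
--             + ret[x + 1][y + 1][z]
--             - ret[x][y][z + 1]
--             - ret[x][y + 1][z]
--             - ret[x + 1][y][z]
--             + ret[x][y][z]
--             + arr[x][y][z]
--         )
--     return ret
-- ===== SOURCE B (Python) =====
-- def cumsum3(arr):
--     X = len(arr)
--     Y = len(arr[0])
--     Z = len(arr[0][0])
--
--     def plane(x):
--         # (Y+1) x (Z+1) 2-D prefix sums of slab arr[x], built row by row
--         rows = [[0] * (Z + 1)]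
--         for y in range(Y):
--             r = [0]
--             for z in range(Z):
--                 r.append(r[-1] + arr[x][y][z])
--             rows.append([a + b for a, b in zip(rows[-1], r)])
--         return rows
--
--     ret = [[[0] * (Z + 1) for _ in range(Y + 1)]]
--     for x in range(X):
--         ret.append([[a + b for a, b in zip(pr, qr)]
--                     for pr, qr in zip(ret[-1], plane(x))])
--     return ret
-- ===== Notes on version B (the rewrite author's own statement) =====
-- stated objective: alternative
-- what changed: B replaces A's preallocated array mutated in place with an 8-term inclusion-exclusion update by a purely functional build: 1-D running prefix sums along z, planes accumulated along y by elementwise addition, and slabs accumulated along x, each list grown by appending.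
-- intended difference: When the first inner row arr[0][0] is empty (Z=0) A's mis-shaped allocation makes it return a single (Y+1)x(X+1) plane of zeros of transposed shape, while B returns the intended (X+1)x(Y+1)x1 all-zero cumulative-sum array. — e.g. on cumsum3([[[]]]): A returns [[[0, 0], [0, 0]]], B returns [[[0], [0]], [[0], [0]]]
import Mathlib
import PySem

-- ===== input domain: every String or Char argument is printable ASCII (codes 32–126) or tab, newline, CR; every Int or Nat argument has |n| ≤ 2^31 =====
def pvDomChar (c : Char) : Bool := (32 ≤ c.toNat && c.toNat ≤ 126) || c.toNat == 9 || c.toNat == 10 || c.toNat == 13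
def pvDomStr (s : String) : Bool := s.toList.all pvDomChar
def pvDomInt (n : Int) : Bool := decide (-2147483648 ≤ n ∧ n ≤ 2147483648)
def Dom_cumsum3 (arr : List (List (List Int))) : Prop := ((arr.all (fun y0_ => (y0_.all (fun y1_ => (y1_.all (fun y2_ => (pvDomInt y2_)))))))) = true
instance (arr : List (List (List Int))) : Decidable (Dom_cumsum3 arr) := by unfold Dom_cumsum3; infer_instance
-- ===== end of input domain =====

-- B rebuilds the cumulative array functionally (prefix sums along z, then elementwise
-- accumulation along y and x) instead of A's in-place 8-term inclusion-exclusion update;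
-- same cost, different decomposition.  See D_cumsum3 for the one corner where they differ.

-- ===== PORT A =====
-- arr[x][y][z] read; the default 0 stands for Python's IndexError, excluded by Pre_cumsum3
def pvGetA (arr : List (List (List Int))) (x y z : Nat) : Int :=
  ((arr.getD x []).getD y []).getD z 0

-- ret[i][j][k] read (indices are nonnegative and in range under Pre_cumsum3)
def pvG (ret : List (List (List Int))) (i j k : Nat) : Int :=
  ((ret.getD i []).getD j []).getD k 0

-- ret[i][j][k] = v (List.set is a no-op out of range; in range under Pre_cumsum3)
def pvSet3 (ret : List (List (List Int))) (i j k : Nat) (v : Int) : List (List (List Int)) :=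
  ret.set i ((ret.getD i []).set j (((ret.getD i []).getD j []).set k v))

def cumsum3 (arr : List (List (List Int))) : List (List (List Int)) :=
  let X := arr.length
  let Y := (arr.headD []).length
  let Z := ((arr.headD []).headD []).length
  -- ret = [[[0]*(X+1) for _ in range(Y+1)] for _ in range(Z+1)]
  let ret0 := List.replicate (Z + 1) (List.replicate (Y + 1) (List.replicate (X + 1) (0 : Int)))
  -- for x, y, z in itertools.product(range(X), range(Y), range(Z)):
  (List.range X).foldl (fun ret x =>
    (List.range Y).foldl (fun ret y =>
      (List.range Z).foldl (fun ret z =>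
        pvSet3 ret (x + 1) (y + 1) (z + 1)
          (pvG ret x (y + 1) (z + 1) + pvG ret (x + 1) y (z + 1) + pvG ret (x + 1) (y + 1) z
           - pvG ret x y (z + 1) - pvG ret x (y + 1) z - pvG ret (x + 1) y z
           + pvG ret x y z + pvGetA arr x y z)) ret) ret) ret0

-- ===== PORT B =====
def cumsum3_alt (arr : List (List (List Int))) : List (List (List Int)) :=
  let X := arr.length
  let Y := (arr.headD []).length
  let Z := ((arr.headD []).headD []).length
  -- plane(x): (Y+1) x (Z+1) 2-D prefix sums of slab arr[x], built row by row
  let plane : Nat → List (List Int) := fun x =>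
    (List.range Y).foldl (fun rows y =>
      let r := (List.range Z).foldl (fun r z =>
        r ++ [r.getLastD 0 + pvGetA arr x y z]) [0]
      rows ++ [((rows.getLastD []).zip r).map (fun ab => ab.1 + ab.2)])
      [List.replicate (Z + 1) (0 : Int)]
  (List.range X).foldl (fun ret x =>
    ret ++ [((ret.getLastD []).zip (plane x)).map
      (fun pq => (pq.1.zip pq.2).map (fun ab => ab.1 + ab.2))])
    [List.replicate (Y + 1) (List.replicate (Z + 1) (0 : Int))]

-- ===== PRECONDITION & SPEC =====
-- Pre_cumsum3 holds exactly where the Python A returns: arr and arr[0] nonempty (else the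
-- len() lines raise IndexError), and either Z = 0 (empty loop) or X = Z with every accessed
-- row long enough (otherwise the mis-shaped ret or a short row raises IndexError).
def Pre_cumsum3 (arr : List (List (List Int))) : Prop :=
  arr ≠ [] ∧ arr.headD [] ≠ [] ∧
  (((arr.headD []).headD []).length = 0 ∨
   (arr.length = ((arr.headD []).headD []).length ∧
    ∀ p ∈ arr, (arr.headD []).length ≤ p.length ∧
      ∀ q ∈ p.take (arr.headD []).length, ((arr.headD []).headD []).length ≤ q.length))
instance (arr : List (List (List Int))) : Decidable (Pre_cumsum3 arr) := by
  unfold Pre_cumsum3; infer_instance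
def pvWitness_cumsum3 : List (List (List Int)) := [[[1]]]

-- When the first inner row arr[0][0] is empty (Z = 0), A's mis-shaped allocation makes it
-- return a single (Y+1)x(X+1) plane of zeros of transposed shape, while B returns the
-- intended (X+1)x(Y+1)x1 all-zero cumulative-sum array.
def D_cumsum3 (arr : List (List (List Int))) : Prop :=
  arr ≠ [] ∧ arr.headD [] ≠ [] ∧ (arr.headD []).headD [] = []
instance (arr : List (List (List Int))) : Decidable (D_cumsum3 arr) := by
  unfold D_cumsum3; infer_instance

def Spec_cumsum3 (arr : List (List (List Int))) (out : List (List (List Int))) : Prop :=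
  ¬ D_cumsum3 arr → out = cumsum3_alt arr
instance (arr : List (List (List Int))) (out : List (List (List Int))) :
    Decidable (Spec_cumsum3 arr out) := by unfold Spec_cumsum3; infer_instance

def pvDiffWitness_cumsum3 : List (List (List Int)) := [[[]]]
def pvDiffWitnessOut_cumsum3 : (List (List (List Int))) × (List (List (List Int))) :=
  ([[[0, 0], [0, 0]]], [[[0], [0]], [[0], [0]]])

-- ===== CLAIM (what is proved, stated in full; the proofs are below) =====
def Claim_unchanged_cumsum3 : Prop := ∀ (arr : List (List (List Int))),
  Dom_cumsum3 arr → Pre_cumsum3 arr → Spec_cumsum3 arr (cumsum3 arr)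
def Claim_changed_cumsum3 : Prop :=
  Dom_cumsum3 (pvDiffWitness_cumsum3) ∧ Pre_cumsum3 (pvDiffWitness_cumsum3) ∧
  D_cumsum3 (pvDiffWitness_cumsum3) ∧
  cumsum3 (pvDiffWitness_cumsum3) = pvDiffWitnessOut_cumsum3.1 ∧
  cumsum3_alt (pvDiffWitness_cumsum3) = pvDiffWitnessOut_cumsum3.2 ∧
  pvDiffWitnessOut_cumsum3.1 ≠ pvDiffWitnessOut_cumsum3.2
def Claim_exact_cumsum3 : Prop := ∀ (arr : List (List (List Int))),
  Dom_cumsum3 arr → Pre_cumsum3 arr → D_cumsum3 arr → cumsum3 arr ≠ cumsum3_alt arr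


-- ===== LEMMAS AND PROOFS =====

-- the exact prefix sums both programs compute
def pvU (arr : List (List (List Int))) (x y k : Nat) : Int :=
  ∑ z ∈ Finset.range k, pvGetA arr x y z
def pvT (arr : List (List (List Int))) (x j k : Nat) : Int :=
  ∑ y ∈ Finset.range j, pvU arr x y k
def pvS (arr : List (List (List Int))) (i j k : Nat) : Int :=
  ∑ x ∈ Finset.range i, pvT arr x j k
def pvCube (arr : List (List (List Int))) (I J K : Nat) : List (List (List Int)) :=
  (List.range I).map (fun i => (List.range J).map (fun j => (List.range K).map (fun k => pvS arr i j k)))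

theorem pvS_zero1 (arr : List (List (List Int))) (j k : Nat) : pvS arr 0 j k = 0 := by
  simp [pvS]
theorem pvS_zero2 (arr : List (List (List Int))) (i k : Nat) : pvS arr i 0 k = 0 := by
  simp [pvS, pvT]
theorem pvS_zero3 (arr : List (List (List Int))) (i j : Nat) : pvS arr i j 0 = 0 := by
  simp [pvS, pvT, pvU]

-- the 8-term inclusion-exclusion identity A's update relies on
theorem pvS_step (arr : List (List (List Int))) (x y z : Nat) :
    pvS arr (x+1) (y+1) (z+1) =
      pvS arr x (y+1) (z+1) + pvS arr (x+1) y (z+1) + pvS arr (x+1) (y+1) z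
      - pvS arr x y (z+1) - pvS arr x (y+1) z - pvS arr (x+1) y z
      + pvS arr x y z + pvGetA arr x y z := by
  simp only [pvS, pvT, pvU, Finset.sum_range_succ, Finset.sum_add_distrib]
  ring

-- ----- B's side: every list B builds is a map of prefix sums -----

theorem pv_zip_map (l : List Nat) {α β : Type} (f g : Nat → α) (h : α → α → β) :
    ((l.map f).zip (l.map g)).map (fun ab => h ab.1 ab.2) = l.map (fun n => h (f n) (g n)) := by
  induction l with
  | nil => rfl
  | cons a t ih => simp [ih]

theorem pv_zip_map2 (l : List Nat) (f g : Nat → List Int) :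
    ((l.map f).zip (l.map g)).map (fun pq => (pq.1.zip pq.2).map (fun ab => ab.1 + ab.2))
      = l.map (fun n => ((f n).zip (g n)).map (fun ab => ab.1 + ab.2)) :=
  pv_zip_map l f g (fun p q => (p.zip q).map (fun ab => ab.1 + ab.2))

theorem pv_foldl_snoc {α : Type} (F : Nat → α) (e : α) (comb : α → Nat → α)
    (h0 : ∀ n, comb (F n) n = F (n+1)) :
    ∀ n, (List.range n).foldl (fun acc t => acc ++ [comb (acc.getLastD e) t]) [F 0]
       = (List.range (n+1)).map F := by
  intro n
  induction n with
  | zero => simp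
  | succ m ih =>
      rw [List.range_succ, List.foldl_append, ih]
      rw [List.range_succ (n := m + 1), List.map_append]
      simp [List.range_succ, h0]

theorem pv_alt_eq_cube (arr : List (List (List Int))) :
    cumsum3_alt arr =
      pvCube arr (arr.length + 1) ((arr.headD []).length + 1)
        (((arr.headD []).headD []).length + 1) := by
  unfold cumsum3_alt pvCube
  have h1 : ∀ x y, (List.range ((arr.headD []).headD []).length).foldl
      (fun r z => r ++ [r.getLastD 0 + pvGetA arr x y z]) [(0 : Int)]
      = (List.range (((arr.headD []).headD []).length + 1)).map (pvU arr x y) := by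
    intro x y
    have := pv_foldl_snoc (pvU arr x y) 0 (fun a t => a + pvGetA arr x y t)
      (fun n => (Finset.sum_range_succ _ n).symm) ((arr.headD []).headD []).length
    simpa [pvU] using this
  simp only [h1]
  have h2 : ∀ x, (List.range (arr.headD []).length).foldl
      (fun rows y => rows ++
        [((rows.getLastD []).zip ((List.range (((arr.headD []).headD []).length + 1)).map (pvU arr x y))).map
          (fun ab => ab.1 + ab.2)])
      [List.replicate (((arr.headD []).headD []).length + 1) (0 : Int)]
      = (List.range ((arr.headD []).length + 1)).map
          (fun j => (List.range (((arr.headD []).headD []).length + 1)).map (fun k => pvT arr x j k)) := by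
    intro x
    have := pv_foldl_snoc
      (fun j => (List.range (((arr.headD []).headD []).length + 1)).map (fun k => pvT arr x j k))
      ([] : List Int)
      (fun prev y => ((prev.zip ((List.range (((arr.headD []).headD []).length + 1)).map (pvU arr x y))).map
        (fun ab => ab.1 + ab.2)))
      (fun n => by
        simp only [pv_zip_map]
        exact List.map_congr_left (fun k _ => (Finset.sum_range_succ _ n).symm))
      (arr.headD []).length
    simpa [pvT, List.map_const', List.eq_replicate_iff] using this
  simp only [h2]
  have h3 := pv_foldl_snoc
    (fun i => (List.range ((arr.headD []).length + 1)).map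
      (fun j => (List.range (((arr.headD []).headD []).length + 1)).map (fun k => pvS arr i j k)))
    ([] : List (List Int))
    (fun prev x => ((prev.zip ((List.range ((arr.headD []).length + 1)).map
        (fun j => (List.range (((arr.headD []).headD []).length + 1)).map (fun k => pvT arr x j k)))).map
      (fun pq => (pq.1.zip pq.2).map (fun ab => ab.1 + ab.2))))
    (fun n => by
      simp only [pv_zip_map2]
      exact List.map_congr_left (fun j _ => by
        simp only [pv_zip_map]
        exact List.map_congr_left (fun k _ => (Finset.sum_range_succ _ n).symm)))
    arr.length
  simpa [pvS, List.map_const', List.eq_replicate_iff] using h3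

-- ----- A's side: loop invariant for the in-place triple loop -----

def pvF (arr : List (List (List Int))) (x y z i j k : Nat) : Int :=
  if 1 ≤ i ∧ 1 ≤ j ∧ 1 ≤ k ∧
     (i - 1 < x ∨ (i - 1 = x ∧ (j - 1 < y ∨ (j - 1 = y ∧ k - 1 < z))))
  then pvS arr i j k else 0

def pvShape (N Y : Nat) (ret : List (List (List Int))) : Prop :=
  ret.length = N + 1 ∧ ∀ i < N + 1, (ret.getD i []).length = Y + 1 ∧
    ∀ j < Y + 1, ((ret.getD i []).getD j []).length = N + 1

def pvInv (arr : List (List (List Int))) (N Y : Nat)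
    (ret : List (List (List Int))) (x y z : Nat) : Prop :=
  pvShape N Y ret ∧
  ∀ i j k, i ≤ N → j ≤ Y → k ≤ N → pvG ret i j k = pvF arr x y z i j k

theorem pv_getD_set {α : Type} (l : List α) (i j : Nat) (x : α) (d : α) :
    (l.set i x).getD j d = if j = i ∧ i < l.length then x else l.getD j d := by
  simp [List.getD, List.getElem?_set]
  split_ifs <;> simp_all

theorem pvG_set3 (ret : List (List (List Int))) (i j k i' j' k' : Nat) (v : Int)
    (hi : i < ret.length) (hj : j < (ret.getD i []).length)
    (hk : k < ((ret.getD i []).getD j []).length) :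
    pvG (pvSet3 ret i j k v) i' j' k' =
      if i' = i ∧ j' = j ∧ k' = k then v else pvG ret i' j' k' := by
  unfold pvG pvSet3
  rw [pv_getD_set]
  by_cases hii : i' = i
  · simp only [hii, hi, and_self, if_true, true_and]
    rw [pv_getD_set]
    by_cases hjj : j' = j
    · simp only [hjj, hj, and_self, if_true, true_and]
      rw [pv_getD_set]
      by_cases hkk : k' = k
      · rw [if_pos ⟨hkk, hk⟩, if_pos hkk]
      · rw [if_neg (by simp [hkk]), if_neg (by simp [hkk])]
    · simp [hjj]
  · simp [hii]

theorem pvSet3_shape (ret : List (List (List Int))) (i j k : Nat) (v : Int) (N Y : Nat)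
    (h : pvShape N Y ret) : pvShape N Y (pvSet3 ret i j k v) := by
  obtain ⟨h1, h2⟩ := h
  refine ⟨by simp [pvSet3, h1], ?_⟩
  intro i' hi'
  unfold pvSet3
  rw [pv_getD_set]
  by_cases hii : i' = i
  · by_cases hilen : i < ret.length
    · simp only [hii, hilen, and_self, if_true]
      have := h2 i (by omega)
      refine ⟨by simpa using this.1, ?_⟩
      intro j' hj'
      rw [pv_getD_set]
      by_cases hjj : j' = j
      · by_cases hjlen : j < (ret.getD i []).length
        · simp only [hjj, hjlen, and_self, if_true]
          simpa using this.2 j (by omega)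
        · rw [if_neg (fun hcon => hjlen hcon.2)]
          exact this.2 j' hj'
      · rw [if_neg (fun hcon => hjj hcon.1)]
        exact this.2 j' hj'
    · rw [if_neg (fun hcon => hilen hcon.2)]
      exact h2 i' hi'
  · rw [if_neg (fun hcon => hii hcon.1)]
    exact h2 i' hi'

theorem pv_getD_replicate {α : Type} (n i : Nat) (a d : α) :
    (List.replicate n a).getD i d = if i < n then a else d := by
  simp [List.getD, List.getElem?_replicate]
  split_ifs <;> rfl

theorem pvInv_init (arr : List (List (List Int))) (N Y : Nat) :
    pvInv arr N Y (List.replicate (N + 1) (List.replicate (Y + 1) (List.replicate (N + 1) (0 : Int)))) 0 0 0 := by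
  refine ⟨⟨by simp, ?_⟩, ?_⟩
  · intro i hi
    rw [pv_getD_replicate, if_pos hi]
    refine ⟨by simp, ?_⟩
    intro j hj
    rw [pv_getD_replicate, if_pos hj]
    simp
  · intro i j k hi hj hk
    unfold pvG pvF
    rw [pv_getD_replicate, if_pos (by omega), pv_getD_replicate, if_pos (by omega),
        pv_getD_replicate, if_pos (by omega)]
    rw [if_neg (by omega)]

theorem pvF_eq_S (arr : List (List (List Int))) (x y z i j k : Nat)
    (h : 1 ≤ i → 1 ≤ j → 1 ≤ k →
      (i - 1 < x ∨ (i - 1 = x ∧ (j - 1 < y ∨ (j - 1 = y ∧ k - 1 < z))))) :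
    pvF arr x y z i j k = pvS arr i j k := by
  unfold pvF
  by_cases hi : 1 ≤ i
  · by_cases hj : 1 ≤ j
    · by_cases hk : 1 ≤ k
      · rw [if_pos ⟨hi, hj, hk, h hi hj hk⟩]
      · rw [if_neg (by omega)]
        have : k = 0 := by omega
        rw [this, pvS_zero3]
    · rw [if_neg (by omega)]
      have : j = 0 := by omega
      rw [this, pvS_zero2]
  · rw [if_neg (by omega)]
    have : i = 0 := by omega
    rw [this, pvS_zero1]

theorem pvInv_step (arr : List (List (List Int))) (N Y : Nat) (ret : List (List (List Int)))
    (x y z : Nat) (hx : x < N) (hy : y < Y) (hz : z < N)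
    (h : pvInv arr N Y ret x y z) :
    pvInv arr N Y
      (pvSet3 ret (x + 1) (y + 1) (z + 1)
        (pvG ret x (y + 1) (z + 1) + pvG ret (x + 1) y (z + 1) + pvG ret (x + 1) (y + 1) z
         - pvG ret x y (z + 1) - pvG ret x (y + 1) z - pvG ret (x + 1) y z
         + pvG ret x y z + pvGetA arr x y z)) x y (z + 1) := by
  obtain ⟨hsh, hval⟩ := h
  obtain ⟨hl, hidx⟩ := hsh
  have hcol := hidx (x + 1) (by omega)
  have hb1 : x + 1 < ret.length := by rw [hl]; omega
  have hb2 : y + 1 < (ret.getD (x + 1) []).length := by rw [hcol.1]; omega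
  have hb3 : z + 1 < ((ret.getD (x + 1) []).getD (y + 1) []).length := by
    rw [hcol.2 (y + 1) (by omega)]; omega
  refine ⟨pvSet3_shape _ _ _ _ _ _ _ ⟨hl, hidx⟩, ?_⟩
  intro i j k hi hj hk
  rw [pvG_set3 ret (x + 1) (y + 1) (z + 1) i j k _ hb1 hb2 hb3]
  by_cases he : i = x + 1 ∧ j = y + 1 ∧ k = z + 1
  · rw [if_pos he]
    obtain ⟨e1, e2, e3⟩ := he
    subst e1; subst e2; subst e3
    rw [hval x (y+1) (z+1) (by omega) (by omega) (by omega),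
        hval (x+1) y (z+1) (by omega) (by omega) (by omega),
        hval (x+1) (y+1) z (by omega) (by omega) (by omega),
        hval x y (z+1) (by omega) (by omega) (by omega),
        hval x (y+1) z (by omega) (by omega) (by omega),
        hval (x+1) y z (by omega) (by omega) (by omega),
        hval x y z (by omega) (by omega) (by omega)]
    rw [pvF_eq_S arr x y z x (y+1) (z+1) (by omega),
        pvF_eq_S arr x y z (x+1) y (z+1) (by omega),
        pvF_eq_S arr x y z (x+1) (y+1) z (by omega),
        pvF_eq_S arr x y z x y (z+1) (by omega),
        pvF_eq_S arr x y z x (y+1) z (by omega),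
        pvF_eq_S arr x y z (x+1) y z (by omega),
        pvF_eq_S arr x y z x y z (by omega)]
    rw [pvF_eq_S arr x y (z+1) (x+1) (y+1) (z+1) (by omega)]
    exact (pvS_step arr x y z).symm
  · rw [if_neg he, hval i j k hi hj hk]
    unfold pvF
    split_ifs with h1 h2 <;> first | rfl | (exfalso; omega)

theorem pvInv_z_done (arr : List (List (List Int))) (N Y : Nat) (ret : List (List (List Int)))
    (x y : Nat) (h : pvInv arr N Y ret x y N) : pvInv arr N Y ret x (y + 1) 0 := by
  obtain ⟨hsh, hval⟩ := h
  refine ⟨hsh, ?_⟩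
  intro i j k hi hj hk
  rw [hval i j k hi hj hk]
  unfold pvF
  split_ifs with h1 h2 <;> first | rfl | (exfalso; omega)

theorem pvInv_y_done (arr : List (List (List Int))) (N Y : Nat) (ret : List (List (List Int)))
    (x : Nat) (h : pvInv arr N Y ret x Y 0) : pvInv arr N Y ret (x + 1) 0 0 := by
  obtain ⟨hsh, hval⟩ := h
  refine ⟨hsh, ?_⟩
  intro i j k hi hj hk
  rw [hval i j k hi hj hk]
  unfold pvF
  split_ifs with h1 h2 <;> first | rfl | (exfalso; omega)

theorem pvInv_inner (arr : List (List (List Int))) (N Y : Nat) (x y : Nat)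
    (hx : x < N) (hy : y < Y) :
    ∀ n ≤ N, ∀ (ret : List (List (List Int))), pvInv arr N Y ret x y 0 →
    pvInv arr N Y
      ((List.range n).foldl (fun ret z =>
        pvSet3 ret (x + 1) (y + 1) (z + 1)
          (pvG ret x (y + 1) (z + 1) + pvG ret (x + 1) y (z + 1) + pvG ret (x + 1) (y + 1) z
           - pvG ret x y (z + 1) - pvG ret x (y + 1) z - pvG ret (x + 1) y z
           + pvG ret x y z + pvGetA arr x y z)) ret) x y n := by
  intro n
  induction n with
  | zero => intro _ ret h; simpa using h
  | succ m ih =>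
      intro hm ret h
      rw [List.range_succ, List.foldl_append, List.foldl_cons, List.foldl_nil]
      exact pvInv_step arr N Y _ x y m hx hy (by omega) (ih (by omega) ret h)

theorem pvInv_middle (arr : List (List (List Int))) (N Y : Nat) (x : Nat) (hx : x < N) :
    ∀ m ≤ Y, ∀ (ret : List (List (List Int))), pvInv arr N Y ret x 0 0 →
    pvInv arr N Y
      ((List.range m).foldl (fun ret y =>
        (List.range N).foldl (fun ret z =>
          pvSet3 ret (x + 1) (y + 1) (z + 1)
            (pvG ret x (y + 1) (z + 1) + pvG ret (x + 1) y (z + 1) + pvG ret (x + 1) (y + 1) z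
             - pvG ret x y (z + 1) - pvG ret x (y + 1) z - pvG ret (x + 1) y z
             + pvG ret x y z + pvGetA arr x y z)) ret) ret) x m 0 := by
  intro m
  induction m with
  | zero => intro _ ret h; simpa using h
  | succ m ih =>
      intro hm ret h
      rw [List.range_succ, List.foldl_append, List.foldl_cons, List.foldl_nil]
      exact pvInv_z_done arr N Y _ x m
        (pvInv_inner arr N Y x m hx (by omega) N le_rfl _ (ih (by omega) ret h))

theorem pvInv_outer (arr : List (List (List Int))) (N Y : Nat) :
    ∀ m ≤ N, ∀ (ret : List (List (List Int))), pvInv arr N Y ret 0 0 0 →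
    pvInv arr N Y
      ((List.range m).foldl (fun ret x =>
        (List.range Y).foldl (fun ret y =>
          (List.range N).foldl (fun ret z =>
            pvSet3 ret (x + 1) (y + 1) (z + 1)
              (pvG ret x (y + 1) (z + 1) + pvG ret (x + 1) y (z + 1) + pvG ret (x + 1) (y + 1) z
               - pvG ret x y (z + 1) - pvG ret x (y + 1) z - pvG ret (x + 1) y z
               + pvG ret x y z + pvGetA arr x y z)) ret) ret) ret) m 0 0 := by
  intro m
  induction m with
  | zero => intro _ ret h; simpa using h
  | succ m ih =>
      intro hm ret h
      rw [List.range_succ, List.foldl_append, List.foldl_cons, List.foldl_nil]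
      exact pvInv_y_done arr N Y _ m
        (pvInv_middle arr N Y m (by omega) Y le_rfl _ (ih (by omega) ret h))

theorem pv_ext_getD {α : Type} (l1 l2 : List α) (d : α) (hlen : l1.length = l2.length)
    (h : ∀ i < l1.length, l1.getD i d = l2.getD i d) : l1 = l2 := by
  apply List.ext_getElem hlen
  intro i h1 h2
  have := h i h1
  rwa [List.getD_eq_getElem _ _ h1, List.getD_eq_getElem _ _ h2] at this

theorem pv_getD_map_range {α : Type} (n i : Nat) (f : Nat → α) (d : α) :
    ((List.range n).map f).getD i d = if i < n then f i else d := by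
  by_cases h : i < n
  · rw [if_pos h, List.getD_eq_getElem _ _ (by simpa using h)]
    simp
  · rw [if_neg h]
    have hle : ((List.range n).map f).length ≤ i := by simpa using Nat.le_of_not_lt h
    simp [List.getD, List.getElem?_eq_none hle]

theorem pv_a_eq_cube (arr : List (List (List Int)))
    (hXZ : arr.length = ((arr.headD []).headD []).length) :
    cumsum3 arr =
      pvCube arr (arr.length + 1) ((arr.headD []).length + 1) (arr.length + 1) := by
  unfold cumsum3
  simp only [← hXZ]
  have hInv := pvInv_outer arr arr.length (arr.headD []).length arr.length le_rfl _
    (pvInv_init arr arr.length (arr.headD []).length)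
  obtain ⟨⟨hl, hidx⟩, hval⟩ := hInv
  have hfin : ∀ i j k, i ≤ arr.length → j ≤ (arr.headD []).length → k ≤ arr.length →
      pvG ((List.range arr.length).foldl (fun ret x =>
        (List.range (arr.headD []).length).foldl (fun ret y =>
          (List.range arr.length).foldl (fun ret z =>
            pvSet3 ret (x + 1) (y + 1) (z + 1)
              (pvG ret x (y + 1) (z + 1) + pvG ret (x + 1) y (z + 1) + pvG ret (x + 1) (y + 1) z
               - pvG ret x y (z + 1) - pvG ret x (y + 1) z - pvG ret (x + 1) y z
               + pvG ret x y z + pvGetA arr x y z)) ret) ret)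
        (List.replicate (arr.length + 1) (List.replicate ((arr.headD []).length + 1)
          (List.replicate (arr.length + 1) (0 : Int))))) i j k = pvS arr i j k := by
    intro i j k hi hj hk
    rw [hval i j k hi hj hk, pvF_eq_S arr arr.length 0 0 i j k (by omega)]
  apply pv_ext_getD _ _ []
  · simpa [pvCube] using hl
  intro i hi1
  have hi' : i < arr.length + 1 := by rw [hl] at hi1; exact hi1
  have hrow := hidx i hi'
  rw [show (pvCube arr (arr.length + 1) ((arr.headD []).length + 1) (arr.length + 1)).getD i []
      = (List.range ((arr.headD []).length + 1)).map
          (fun j => (List.range (arr.length + 1)).map (fun k => pvS arr i j k)) from by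
    simp [pvCube, hi']]
  apply pv_ext_getD _ _ []
  · rw [hrow.1]; simp
  intro j hj1
  have hj' : j < (arr.headD []).length + 1 := by rw [hrow.1] at hj1; exact hj1
  rw [pv_getD_map_range, if_pos hj']
  apply pv_ext_getD _ _ 0
  · rw [hrow.2 j hj']; simp
  intro k hk1
  have hk' : k < arr.length + 1 := by rw [hrow.2 j hj'] at hk1; exact hk1
  rw [pv_getD_map_range, if_pos hk']
  exact hfin i j k (by omega) (by omega) (by omega)

-- ===== VERDICT (by name: the statement is the Claim_ definition above) =====
theorem cumsum3_spec : Claim_unchanged_cumsum3 := by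
  intro arr _ hpre hD
  obtain ⟨h1, h2, h3⟩ := hpre
  have hzne : ((arr.headD []).headD []).length ≠ 0 := by
    intro h0
    exact hD ⟨h1, h2, List.length_eq_zero_iff.mp h0⟩
  have hXZ := (h3.resolve_left hzne).1
  rw [pv_a_eq_cube arr hXZ, pv_alt_eq_cube arr, hXZ]

theorem cumsum3_changed : Claim_changed_cumsum3 := by
  unfold Claim_changed_cumsum3; decide

theorem cumsum3_tight : Claim_exact_cumsum3 := by
  intro arr _ _ hd heq
  obtain ⟨h1, _, h3⟩ := hd
  have hZ : ((arr.headD []).headD []).length = 0 := by rw [h3]; rfl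
  have hZ2 : ((arr.head?.getD []).head?.getD []).length = 0 := by simpa using hZ
  have hA : (cumsum3 arr).length = 1 := by
    simp [cumsum3, hZ2]
  have hB : (cumsum3_alt arr).length = arr.length + 1 := by
    rw [pv_alt_eq_cube]; simp [pvCube]
  have hx : arr.length ≠ 0 := fun h => h1 (List.length_eq_zero_iff.mp h)
  rw [heq, hB] at hA
  omega
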